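-- pv_equiv track=rewrite | github.com/Pranay38/PitchSide | scripts/build_similarity_matrix.py | pick_player_key_from_maps
-- ===== SOURCE A (Python) =====
-- from typing import Any
--
-- def pick_player_key_from_maps(
--     raw_key: str | None,
--     raw_name: str | None,
--     raw_club: str | None,
--     raw_league: str | None,
--     players: dict[str, dict[str, Any]],
--     keys_by_name: dict[str, list[str]],
-- ) -> str | None:
--     if raw_key and raw_key in players:
--         return raw_key
--
--     if not raw_name:
--         return None
--
--     candidates = list(keys_by_name.get(raw_name, []))
--     if not candidates:
--         return None
--
--     if raw_club:
--         club_filtered = [key for key in candidates if str(players[key].get("club", "")) == raw_club]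
--         if club_filtered:
--             candidates = club_filtered
--
--     if raw_league and len(candidates) > 1:
--         league_filtered = [key for key in candidates if str(players[key].get("league", "")) == raw_league]
--         if league_filtered:
--             candidates = league_filtered
--
--     return candidates[0] if candidates else None
-- ===== SOURCE B (Python) =====
-- def pick_player_key_from_maps(
--     raw_key,
--     raw_name,
--     raw_club,
--     raw_league,
--     players,
--     keys_by_name,
-- ):
--     if raw_key and raw_key in players:
--         return raw_key
--
--     if not raw_name:
--         return None
--
--     candidates = keys_by_name.get(raw_name, [])
--     if not candidates:
--         return None
--
--     # One scoring pass: club match is worth 2, league match 1; the first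
--     # candidate with the maximal score is returned (strict > keeps the first).
--     def score(key):
--         p = players.get(key, {})
--         s = 0
--         if raw_club and str(p.get("club", "")) == raw_club:
--             s += 2
--         if raw_league and str(p.get("league", "")) == raw_league:
--             s += 1
--         return s
--
--     best = candidates[0]
--     best_score = score(best)
--     for key in candidates[1:]:
--         sc = score(key)
--         if sc > best_score:
--             best, best_score = key, sc
--     return best
-- ===== Notes on version B (the rewrite author's own statement) =====
-- stated objective: alternative
-- what changed: Replaces A's staged filtering (club filter, then conditional league filter, then head) by a single scoring pass that gives each candidate 2 points for a club match and 1 for a league match and returns the first candidate with the maximal score.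
import Mathlib
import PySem

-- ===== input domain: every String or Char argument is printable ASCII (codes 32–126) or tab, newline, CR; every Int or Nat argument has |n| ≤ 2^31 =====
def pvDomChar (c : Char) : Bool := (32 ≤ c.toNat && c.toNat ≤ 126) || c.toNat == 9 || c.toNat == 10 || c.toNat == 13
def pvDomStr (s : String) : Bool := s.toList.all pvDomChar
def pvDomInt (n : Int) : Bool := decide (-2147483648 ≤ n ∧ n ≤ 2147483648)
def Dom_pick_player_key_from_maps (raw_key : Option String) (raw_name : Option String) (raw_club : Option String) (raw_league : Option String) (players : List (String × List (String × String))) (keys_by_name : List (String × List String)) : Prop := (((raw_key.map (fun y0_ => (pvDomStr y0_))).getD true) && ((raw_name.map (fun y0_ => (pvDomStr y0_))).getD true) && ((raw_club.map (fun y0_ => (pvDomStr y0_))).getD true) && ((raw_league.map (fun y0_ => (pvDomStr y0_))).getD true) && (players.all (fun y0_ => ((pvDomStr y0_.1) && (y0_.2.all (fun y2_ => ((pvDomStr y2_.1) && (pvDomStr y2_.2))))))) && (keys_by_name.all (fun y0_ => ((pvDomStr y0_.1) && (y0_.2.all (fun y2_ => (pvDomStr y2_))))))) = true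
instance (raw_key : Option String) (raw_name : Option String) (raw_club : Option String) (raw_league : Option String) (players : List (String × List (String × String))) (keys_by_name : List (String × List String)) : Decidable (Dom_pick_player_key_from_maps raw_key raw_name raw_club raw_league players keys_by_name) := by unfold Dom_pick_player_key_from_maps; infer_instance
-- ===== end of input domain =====

-- B replaces A's staged filter passes by one scoring pass (club=2, league=1, first max wins);
-- equal return values proved on Pre_ (the inputs where A raises no KeyError).

-- Python truthiness of an Optional[str]: None and "" are falsy.
def pvTruthy : Option String → Bool
  | none => false
  | some s => s ≠ ""

-- dict lookup on an association list: first match (exact for Python dicts with unique keys).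
def pvGet? {α : Type} (d : List (String × α)) (k : String) : Option α :=
  (d.find? (fun p => p.1 == k)).map (·.2)

def pvGetD {α : Type} (d : List (String × α)) (k : String) (dflt : α) : α :=
  (pvGet? d k).getD dflt

-- ===== PORT A =====
def pick_player_key_from_maps (raw_key : Option String) (raw_name : Option String) (raw_club : Option String) (raw_league : Option String) (players : List (String × List (String × String))) (keys_by_name : List (String × List String)) : Option String :=
  if pvTruthy raw_key && (pvGet? players (raw_key.getD "")).isSome then
    raw_key
  else if !pvTruthy raw_name then
    none
  else
    let candidates := pvGetD keys_by_name (raw_name.getD "") []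
    if candidates.isEmpty then
      none
    else
      -- players[key] is a raising lookup in Python; Pre_ guarantees the key is present, so pvGetD is exact there
      let candidates1 :=
        if pvTruthy raw_club then
          let club_filtered := candidates.filter
            (fun key => pvGetD (pvGetD players key []) "club" "" == raw_club.getD "")
          if !club_filtered.isEmpty then club_filtered else candidates
        else candidates
      let candidates2 :=
        if pvTruthy raw_league && decide (1 < candidates1.length) then
          let league_filtered := candidates1.filter
            (fun key => pvGetD (pvGetD players key []) "league" "" == raw_league.getD "")
          if !league_filtered.isEmpty then league_filtered else candidates1
        else candidates1
      candidates2.head?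

-- ===== PORT B =====
-- score(key) = 2·[club matches] + 1·[league matches], with the same truthiness guards as Source B
def pvScore (raw_club : Option String) (raw_league : Option String) (players : List (String × List (String × String))) (key : String) : Nat :=
  let p := pvGetD players key []
  (if pvTruthy raw_club && (pvGetD p "club" "" == raw_club.getD "") then 2 else 0)
  + (if pvTruthy raw_league && (pvGetD p "league" "" == raw_league.getD "") then 1 else 0)

def pick_player_key_from_maps_alt (raw_key : Option String) (raw_name : Option String) (raw_club : Option String) (raw_league : Option String) (players : List (String × List (String × String))) (keys_by_name : List (String × List String)) : Option String :=
  if pvTruthy raw_key && (pvGet? players (raw_key.getD "")).isSome then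
    raw_key
  else if !pvTruthy raw_name then
    none
  else
    match pvGetD keys_by_name (raw_name.getD "") [] with
    | [] => none
    | best :: rest =>
        some (rest.foldl
          (fun best key =>
            if pvScore raw_club raw_league players key > pvScore raw_club raw_league players best
            then key else best)
          best)

-- ===== PRECONDITION & SPEC =====
-- Pre_ excludes exactly the inputs on which A raises KeyError: past the early returns, whenever a
-- filtering pass actually runs (raw_club truthy, or raw_league truthy with more than one candidate),
-- every candidate key listed under raw_name must be a key of players.
def Pre_pick_player_key_from_maps (raw_key : Option String) (raw_name : Option String) (raw_club : Option String) (raw_league : Option String) (players : List (String × List (String × String))) (keys_by_name : List (String × List String)) : Prop :=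
  (pvTruthy raw_key && (pvGet? players (raw_key.getD "")).isSome) = false →
  pvTruthy raw_name = true →
  pvGetD keys_by_name (raw_name.getD "") [] ≠ [] →
  (pvTruthy raw_club = true ∨ (pvTruthy raw_league = true ∧ 1 < (pvGetD keys_by_name (raw_name.getD "") []).length)) →
  ∀ k ∈ pvGetD keys_by_name (raw_name.getD "") [], (pvGet? players k).isSome = true
instance (raw_key : Option String) (raw_name : Option String) (raw_club : Option String) (raw_league : Option String) (players : List (String × List (String × String))) (keys_by_name : List (String × List String)) : Decidable (Pre_pick_player_key_from_maps raw_key raw_name raw_club raw_league players keys_by_name) := by unfold Pre_pick_player_key_from_maps; infer_instance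

def pvWitness_pick_player_key_from_maps : Option String × Option String × Option String × Option String × (List (String × List (String × String))) × (List (String × List String)) :=
  (none, some "n", some "c", some "l",
   [("k1", [("club", "c"), ("league", "l")]), ("k2", [("club", "c")])],
   [("n", ["k1", "k2"])])

def Spec_pick_player_key_from_maps (raw_key : Option String) (raw_name : Option String) (raw_club : Option String) (raw_league : Option String) (players : List (String × List (String × String))) (keys_by_name : List (String × List String)) (out : Option String) : Prop := out = pick_player_key_from_maps_alt raw_key raw_name raw_club raw_league players keys_by_name
instance (raw_key : Option String) (raw_name : Option String) (raw_club : Option String) (raw_league : Option String) (players : List (String × List (String × String))) (keys_by_name : List (String × List String)) (out : Option String) : Decidable (Spec_pick_player_key_from_maps raw_key raw_name raw_club raw_league players keys_by_name out) := by unfold Spec_pick_player_key_from_maps; infer_instance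

-- ===== CLAIM (what is proved, stated in full; the proofs are below) =====
def Claim_equal_pick_player_key_from_maps : Prop := ∀ (raw_key : Option String) (raw_name : Option String) (raw_club : Option String) (raw_league : Option String) (players : List (String × List (String × String))) (keys_by_name : List (String × List String)), Dom_pick_player_key_from_maps raw_key raw_name raw_club raw_league players keys_by_name → Pre_pick_player_key_from_maps raw_key raw_name raw_club raw_league players keys_by_name → Spec_pick_player_key_from_maps raw_key raw_name raw_club raw_league players keys_by_name (pick_player_key_from_maps raw_key raw_name raw_club raw_league players keys_by_name)


-- ===== LEMMAS AND PROOFS =====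

-- find? = head of filter
theorem pvFind?_eq_head?_filter {α : Type} (p : α → Bool) (l : List α) :
    l.find? p = (l.filter p).head? := by
  induction l with
  | nil => rfl
  | cons x xs ih =>
      cases h : p x with
      | true =>
          rw [List.find?_cons_of_pos h, List.filter_cons_of_pos h]
          rfl
      | false =>
          rw [List.find?_cons_of_neg (by simp [h]), List.filter_cons_of_neg (by simp [h])]
          exact ih

-- find? only depends on the predicate's values on the list
theorem pvFind?_congr {α : Type} (p q : α → Bool) (l : List α)
    (h : ∀ x ∈ l, p x = q x) : l.find? p = l.find? q := by
  induction l with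
  | nil => rfl
  | cons x xs ih =>
      have hx := h x (List.mem_cons_self)
      have ih' := ih (fun y hy => h y (List.mem_cons_of_mem _ hy))
      cases hp : p x with
      | true =>
          rw [List.find?_cons_of_pos hp, List.find?_cons_of_pos (hx ▸ hp)]
      | false =>
          have hqx : q x = false := hx ▸ hp
          rw [List.find?_cons_of_neg (by simp [hp]), List.find?_cons_of_neg (by simp [hqx])]
          exact ih' 

-- the first-max fold: its result is maximal and is the first element attaining its score
theorem pvFold_spec (f : String → Nat) (c : String) (cs : List String) :
    (∀ x ∈ c :: cs,
        f x ≤ f (cs.foldl (fun b k => if f k > f b then k else b) c)) ∧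
    (c :: cs).find?
        (fun x => f (cs.foldl (fun b k => if f k > f b then k else b) c) ≤ f x)
      = some (cs.foldl (fun b k => if f k > f b then k else b) c) := by
  induction cs generalizing c with
  | nil =>
      refine ⟨?_, ?_⟩
      · intro x hx; simp at hx; subst hx; rfl
      · simp [List.find?]
  | cons k cs ih =>
      set c' : String := if f k > f c then k else c with hc'
      have hfold : (k :: cs).foldl (fun b k => if f k > f b then k else b) c
          = cs.foldl (fun b k => if f k > f b then k else b) c' := rfl
      obtain ⟨ihmax, ihfind⟩ := ih c'
      set r : String := cs.foldl (fun b k => if f k > f b then k else b) c' with hr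
      have hcle : f c ≤ f r := by
        have h1 : f c ≤ f c' := by
          by_cases h : f k > f c
          · simp [hc', h]; omega
          · simp [hc', h]
        exact le_trans h1 (ihmax c' List.mem_cons_self)
      have hkle : f k ≤ f r := by
        have h1 : f k ≤ f c' := by
          by_cases h : f k > f c
          · simp [hc', h]
          · simp [hc', h]; omega
        exact le_trans h1 (ihmax c' List.mem_cons_self)
      refine ⟨?_, ?_⟩
      · intro x hx
        rw [hfold]
        rcases List.mem_cons.mp hx with hx | hx
        · subst hx; exact hcle
        rcases List.mem_cons.mp hx with hx | hx
        · subst hx; exact hkle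
        · exact ihmax x (List.mem_cons_of_mem _ hx)
      · rw [hfold]
        by_cases h : f k > f c
        · -- c' = k; c does not satisfy the predicate
          have hc'k : c' = k := by simp [hc', h]
          have hclt : f c < f r := lt_of_lt_of_le h hkle
          rw [List.find?_cons_of_neg (by simp; omega)]
          rw [hc'k] at ihfind
          exact ihfind
        · have hc'c : c' = c := by simp [hc', h]
          rw [hc'c] at ihfind
          by_cases hpc : f r ≤ f c
          · -- c satisfies; find? (c::cs) = some c, so r = c
            have h1 : (c :: cs).find? (fun x => decide (f r ≤ f x)) = some c := by
              rw [List.find?_cons_of_pos (by simp [hpc])]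
            have hrc : r = c := Option.some_inj.mp (ihfind.symm.trans h1)
            rw [List.find?_cons_of_pos (by simp [hpc]), hrc]
          · -- c fails, k fails (f k ≤ f c < f r)
            have hkc : f k ≤ f c := by omega
            rw [List.find?_cons_of_neg (by simp; omega),
                List.find?_cons_of_neg (by simp; omega)]
            rw [List.find?_cons_of_neg (by simp; omega)] at ihfind
            exact ihfind

-- abbreviation for the fold result
def pvBest (f : String → Nat) (c : String) (cs : List String) : String :=
  cs.foldl (fun b k => if f k > f b then k else b) c

-- A's staged core, written over abstract predicates p (club match) and q (league match)
def pvStaged (p q : String → Bool) (useQ : Bool) (l : List String) : Option String :=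
  let c1 := if (l.filter p).isEmpty then l else l.filter p
  let c2 :=
    if useQ && decide (1 < c1.length) then
      if (c1.filter q).isEmpty then c1 else c1.filter q
    else c1
  c2.head?

-- master lemma: the staged filters pick exactly the first candidate of maximal score 2·p + q
theorem pvStaged_eq_best (p q : String → Bool) (useQ : Bool)
    (hq : useQ = false → ∀ x, q x = false)
    (c : String) (cs : List String)
    (f : String → Nat)
    (hf : ∀ x, f x = (if p x then 2 else 0) + (if q x then 1 else 0)) :
    pvStaged p q useQ (c :: cs) = some (pvBest f c cs) := by
  obtain ⟨hmax', hfind'⟩ := pvFold_spec f c cs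
  set r : String := pvBest f c cs with hrdef
  set l : List String := c :: cs with hl
  have hmax : ∀ x ∈ l, f x ≤ f r := hmax'
  have hfind : l.find? (fun x => decide (f r ≤ f x)) = some r := hfind'
  have hrmem : r ∈ l := List.mem_of_find?_eq_some hfind
  have key : ∀ g : String → Bool, (∀ x ∈ l, (decide (f r ≤ f x)) = g x) →
      (l.filter g).head? = some r := by
    intro g hg
    rw [← pvFind?_eq_head?_filter, ← pvFind?_congr _ _ _ hg]
    exact hfind
  have hhead : f r = 0 → l.head? = some r := by
    intro h0
    have h1 : l.find? (fun x => decide (f r ≤ f x)) = some c := by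
      rw [hl, List.find?_cons_of_pos (by simp [h0])]
    have : r = c := Option.some_inj.mp (hfind.symm.trans h1)
    rw [hl, this]
    rfl
  simp only [pvStaged]
  by_cases hS : (l.filter p).isEmpty = true
  · -- no club match among candidates
    rw [if_pos hS]
    have hpl : ∀ x ∈ l, p x = false := by
      intro x hx
      by_contra hpx
      simp only [Bool.not_eq_false] at hpx
      have : x ∈ l.filter p := List.mem_filter.mpr ⟨hx, hpx⟩
      rw [List.isEmpty_iff] at hS
      simp [hS] at this
    have hflt : ∀ x ∈ l, f x = (if q x then 1 else 0) := by
      intro x hx; rw [hf, hpl x hx]; simp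
    by_cases hU : (useQ && decide (1 < l.length)) = true
    · rw [if_pos hU]
      by_cases hL : (l.filter q).isEmpty = true
      · -- everything scores 0
        rw [if_pos hL]
        have hql : ∀ x ∈ l, q x = false := by
          intro x hx
          by_contra hqx
          simp only [Bool.not_eq_false] at hqx
          have : x ∈ l.filter q := List.mem_filter.mpr ⟨hx, hqx⟩
          rw [List.isEmpty_iff] at hL
          simp [hL] at this
        have hf0 : f r = 0 := by rw [hflt r hrmem, hql r hrmem]; simp
        exact hhead hf0
      · -- some league match: max score is 1, first q-element wins
        rw [if_neg hL]
        have hLne : l.filter q ≠ [] := by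
          intro h; exact hL (by simp [h])
        obtain ⟨y, hy⟩ := List.exists_mem_of_ne_nil _ hLne
        have hym := List.mem_filter.mp hy
        have hfr1 : f r = 1 := by
          have h1 : f y ≤ f r := hmax y hym.1
          have h2 : f y = 1 := by rw [hflt y hym.1, hym.2]; simp
          have h3 : f r ≤ 1 := by rw [hflt r hrmem]; split <;> omega
          omega
        apply key
        intro x hx
        rw [hfr1, hflt x hx]
        cases hqx : q x <;> simp [hqx]
    · -- league branch skipped: either useQ false (all scores 0) or single candidate
      rw [if_neg hU]
      cases hUq : useQ with
      | false =>
          have hf0 : f r = 0 := by rw [hflt r hrmem, hq hUq r]; simp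
          exact hhead hf0
      | true =>
          have hlen : ¬ (1 < l.length) := by
            intro hlen; exact hU (by simp [hUq, hlen])
          have hcs : cs = [] := by
            have h' : cs.length = 0 := by
              simp only [hl, List.length_cons] at hlen
              omega
            exact List.length_eq_zero_iff.mp h'
          subst hcs
          have hrc : r = c := rfl
          rw [hl, hrc]
          rfl
  · -- club matches exist: S = l.filter p ≠ []
    rw [if_neg hS]
    have hS' : l.filter p ≠ [] := by
      intro h; exact hS (by simp [h])
    have hfp : ∀ x ∈ l, p x = true → 2 ≤ f x := by
      intro x _ hpx; rw [hf, hpx]; simp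
    have hfnp : ∀ x ∈ l, p x = false → f x ≤ 1 := by
      intro x _ hpx; rw [hf, hpx]; cases hqx : q x <;> simp [hqx]
    obtain ⟨s0, hs0⟩ := List.exists_mem_of_ne_nil _ hS'
    have hs0m := List.mem_filter.mp hs0
    have hfr2 : 2 ≤ f r := le_trans (hfp s0 hs0m.1 hs0m.2) (hmax s0 hs0m.1)
    have hpr : p r = true := by
      by_contra h
      simp only [Bool.not_eq_true] at h
      have := hfnp r hrmem h
      omega
    set S : List String := l.filter p with hSdef
    by_cases hU : (useQ && decide (1 < S.length)) = true
    · rw [if_pos hU]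
      by_cases hL : (S.filter q).isEmpty = true
      · -- no league match inside S: max is 2, first p-element wins
        rw [if_pos hL]
        have hnoq : ∀ x ∈ l, p x = true → q x = false := by
          intro x hx hpx
          by_contra hqx
          simp only [Bool.not_eq_false] at hqx
          have : x ∈ S.filter q := List.mem_filter.mpr ⟨List.mem_filter.mpr ⟨hx, hpx⟩, hqx⟩
          rw [List.isEmpty_iff] at hL
          simp [hL] at this
        have hfr : f r = 2 := by
          rw [hf, hpr, hnoq r hrmem hpr]; simp
        rw [hSdef]
        apply key
        intro x hx
        rw [hfr, hf]
        cases hpx : p x with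
        | true => have hqx := hnoq x hx hpx; simp [hpx, hqx]
        | false => cases hqx : q x <;> simp [hpx, hqx]
      · -- league match inside S : max is 3, first p∧q element wins
        rw [if_neg hL]
        have hLne : S.filter q ≠ [] := by
          intro h; exact hL (by simp [h])
        obtain ⟨y, hy⟩ := List.exists_mem_of_ne_nil _ hLne
        have hy1 := List.mem_filter.mp hy
        have hy2 := List.mem_filter.mp hy1.1
        have hfy : f y = 3 := by rw [hf, hy2.2, hy1.2]; simp
        have hfr3 : f r = 3 := by
          have h1 : f y ≤ f r := hmax y hy2.1
          have h2 : f r ≤ 3 := by rw [hf]; cases hpx : p r <;> cases hqx : q r <;> simp [hpx, hqx]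
          omega
        have hfilter : S.filter q = l.filter (fun x => p x && q x) := by
          rw [hSdef, List.filter_filter]
          exact List.filter_congr (fun x _ => Bool.and_comm _ _)
        rw [hfilter]
        apply key
        intro x hx
        rw [hfr3, hf]
        cases hpx : p x <;> cases hqx : q x <;> simp [hpx, hqx]
    · -- league branch on S skipped
      rw [if_neg hU]
      cases hUq : useQ with
      | false =>
          have hfr : f r = 2 := by
            rw [hf, hpr, hq hUq r]; simp
          rw [hSdef]
          apply key
          intro x hx
          rw [hfr, hf, hq hUq x]
          cases hpx : p x <;> simp [hpx]
      | true =>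
          -- S = [s0']: the unique element of score ≥ 2; r must be it
          have hlen : ¬ (1 < S.length) := by
            intro hlen; exact hU (by simp [hUq, hlen])
          have hpos : 0 < S.length := List.length_pos_iff.mpr hS'
          have hS1 : S.length = 1 := by omega
          obtain ⟨z, hz⟩ := List.length_eq_one_iff.mp hS1
          have hrz : r = z := by
            have : r ∈ S := List.mem_filter.mpr ⟨hrmem, hpr⟩
            rw [hz] at this; simpa using this
          rw [hz, hrz]; rfl

-- A's computed branches coincide with pvStaged at the effective predicates
theorem pvA_eq_staged (raw_club raw_league : Option String)
    (players : List (String × List (String × String))) (l : List String) :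
    (let candidates1 :=
        if pvTruthy raw_club then
          let club_filtered := l.filter
            (fun key => pvGetD (pvGetD players key []) "club" "" == raw_club.getD "")
          if !club_filtered.isEmpty then club_filtered else l
        else l
      let candidates2 :=
        if pvTruthy raw_league && decide (1 < candidates1.length) then
          let league_filtered := candidates1.filter
            (fun key => pvGetD (pvGetD players key []) "league" "" == raw_league.getD "")
          if !league_filtered.isEmpty then league_filtered else candidates1
        else candidates1
      candidates2.head?)
    = pvStaged
        (fun key => pvTruthy raw_club && (pvGetD (pvGetD players key []) "club" "" == raw_club.getD ""))
        (fun key => pvTruthy raw_league && (pvGetD (pvGetD players key []) "league" "" == raw_league.getD ""))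
        (pvTruthy raw_league) l := by
  have hswap : ∀ (a b : List String), (if !a.isEmpty then a else b) = if a.isEmpty = true then b else a := by
    intro a b; cases h : a.isEmpty <;> simp [h]
  simp only [pvStaged, hswap]
  cases hc : pvTruthy raw_club <;> cases hlg : pvTruthy raw_league <;>
    simp only [hc, hlg, Bool.true_and, Bool.false_and, List.filter_false, List.isEmpty_nil,
      if_true, if_false, Bool.false_eq_true]

-- ===== VERDICT (by name: the statement is the Claim_ definition above) =====
theorem pick_player_key_from_maps_spec : Claim_equal_pick_player_key_from_maps := by
  intro raw_key raw_name raw_club raw_league players keys_by_name _ _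
  unfold Spec_pick_player_key_from_maps
  unfold pick_player_key_from_maps pick_player_key_from_maps_alt
  by_cases h1 : (pvTruthy raw_key && (pvGet? players (raw_key.getD "")).isSome) = true
  · rw [if_pos h1, if_pos h1]
  · rw [if_neg h1, if_neg h1]
    by_cases h2 : pvTruthy raw_name = true
    · have hnn : ¬((!pvTruthy raw_name) = true) := by simp [h2]
      rw [if_neg hnn, if_neg hnn]
      cases hcand : pvGetD keys_by_name (raw_name.getD "") [] with
      | nil => simp [hcand]
      | cons c cs =>
          simp only [hcand, List.isEmpty_cons, Bool.false_eq_true, if_false]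
          exact (pvA_eq_staged raw_club raw_league players (c :: cs)).trans
            ((pvStaged_eq_best
                (fun key => pvTruthy raw_club && (pvGetD (pvGetD players key []) "club" "" == raw_club.getD ""))
                (fun key => pvTruthy raw_league && (pvGetD (pvGetD players key []) "league" "" == raw_league.getD ""))
                (pvTruthy raw_league)
                (fun h x => by rw [h]; simp)
                c cs (pvScore raw_club raw_league players)
                (fun x => by simp [pvScore])).trans rfl)
    · simp only [Bool.not_eq_true] at h2
      have hnn : (!pvTruthy raw_name) = true := by simp [h2]
      rw [if_pos hnn, if_pos hnn]
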